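-- pv_equiv track=rewrite | github.com/vivit36/Yandex-Algorithms-4.0 | Warm-up/task_E.py | discontent2
-- ===== SOURCE A (Python) =====
-- def discontent2(n, arr):
--     pref_sum = [0] * n
--     post_sum = [0] * n
--
--     for i in range(1, n):
--         pref_sum[i] = (arr[i] - arr[i - 1]) * i + pref_sum[i - 1]
--
--     for i in range(n-2, -1, -1):
--         post_sum[i] = (arr[i + 1] - arr[i]) * (n - (i + 1)) + post_sum[i + 1]
--
--     return list(map(sum, zip(pref_sum, post_sum)))
-- ===== SOURCE B (Python) =====
-- def discontent2(n, arr):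
--     if n <= 0:
--         return []
--     a = arr[:n]
--     S = sum(a)
--     res = []
--     P = 0
--     for i, x in enumerate(a):
--         res.append(i * x - P + (S - P - x) - (n - 1 - i) * x)
--         P += x
--     return res
-- ===== Notes on version B (the rewrite author's own statement) =====
-- stated objective: simpler
-- what changed: Replaces A's two preallocated telescoping difference-recurrence arrays (forward and backward index loops with in-place assignment, then zip+sum) by one forward pass that keeps a running value prefix sum P and emits each result directly from the closed form i*x - P + (S - P - x) - (n-1-i)*x.
-- outside the precondition, e.g. on discontent2(1, []): A returns [0], B returns []
import Mathlib
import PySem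

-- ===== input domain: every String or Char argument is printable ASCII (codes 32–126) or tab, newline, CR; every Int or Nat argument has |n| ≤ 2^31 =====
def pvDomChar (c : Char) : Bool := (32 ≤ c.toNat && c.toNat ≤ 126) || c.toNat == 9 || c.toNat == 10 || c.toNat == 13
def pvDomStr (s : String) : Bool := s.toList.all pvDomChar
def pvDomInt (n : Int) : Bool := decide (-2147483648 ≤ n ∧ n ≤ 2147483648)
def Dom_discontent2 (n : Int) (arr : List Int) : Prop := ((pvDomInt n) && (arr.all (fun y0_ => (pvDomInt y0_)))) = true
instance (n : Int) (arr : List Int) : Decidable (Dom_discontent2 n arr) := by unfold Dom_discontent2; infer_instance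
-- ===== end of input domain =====

-- B replaces A's two telescoping difference-recurrence arrays by a single forward pass over a
-- running value prefix sum with a closed form per index (objective: simpler, same O(n) cost).

-- ===== PORT A =====
-- loop body of A's first for-loop: pref_sum[i] = (arr[i] - arr[i-1]) * i + pref_sum[i-1]
def pyPref (arr : List Int) (ps : List Int) (i : Int) : List Int :=
  PySem.List.pySetD ps i
    ((PySem.List.pyGetD arr i 0 - PySem.List.pyGetD arr (i - 1) 0) * i + PySem.List.pyGetD ps (i - 1) 0)

-- loop body of A's second for-loop: post_sum[i] = (arr[i+1] - arr[i]) * (n - (i+1)) + post_sum[i+1]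
def pyPost (n : Int) (arr : List Int) (ps : List Int) (i : Int) : List Int :=
  PySem.List.pySetD ps i
    ((PySem.List.pyGetD arr (i + 1) 0 - PySem.List.pyGetD arr i 0) * (n - (i + 1)) + PySem.List.pyGetD ps (i + 1) 0)

def discontent2 (n : Int) (arr : List Int) : List Int :=
  let pref_sum := (PySem.List.pyRange 1 n 1).foldl (pyPref arr) (List.replicate n.toNat 0)
  let post_sum := (PySem.List.pyRange (n - 2) (-1) (-1)).foldl (pyPost n arr) (List.replicate n.toNat 0)
  (pref_sum.zip post_sum).map (fun p => p.1 + p.2)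

-- ===== PORT B =====
-- loop body of B: res.append(i*x - P + (S - P - x) - (n-1-i)*x); P += x
def bStep (n S : Int) (st : List Int × Int) (ix : Int × Int) : List Int × Int :=
  (st.1 ++ [ix.1 * ix.2 - st.2 + (S - st.2 - ix.2) - (n - 1 - ix.1) * ix.2], st.2 + ix.2)

def discontent2_alt (n : Int) (arr : List Int) : List Int :=
  if n ≤ 0 then []
  else
    let a := PySem.List.slice arr none (some n)
    let S := a.sum
    ((PySem.List.enumerate a 0).foldl (bStep n S) ([], 0)).1

-- ===== PRECONDITION & SPEC =====
-- Pre_ excludes n > len(arr): there A raises IndexError whenever n ≥ 2, and at the single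
-- returning corner n = 1 with arr = [] it returns the padding artefact [0] of its [0]*n
-- preallocation, where B naturally returns [].
def Pre_discontent2 (n : Int) (arr : List Int) : Prop := n ≤ (arr.length : Int)
instance (n : Int) (arr : List Int) : Decidable (Pre_discontent2 n arr) := by unfold Pre_discontent2; infer_instance
def pvWitness_discontent2 : Int × List Int := (3, [5, -2, 7])

def Spec_discontent2 (n : Int) (arr : List Int) (out : List Int) : Prop := out = discontent2_alt n arr
instance (n : Int) (arr : List Int) (out : List Int) : Decidable (Spec_discontent2 n arr out) := by unfold Spec_discontent2; infer_instance

-- ===== CLAIM (what is proved, stated in full; the proofs are below) =====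
def Claim_equal_discontent2 : Prop := ∀ (n : Int) (arr : List Int), Dom_discontent2 n arr → Pre_discontent2 n arr → Spec_discontent2 n arr (discontent2 n arr)

-- ===== LEMMAS AND PROOFS =====

-- sum of the first j values
def presum (arr : List Int) (j : Nat) : Int := (arr.take j).sum

-- closed form of A's pref_sum[j] and post_sum[j]
def cfp (arr : List Int) (j : Nat) : Int := (j : Int) * arr.getD j 0 - presum arr j
def cfq (n : Int) (arr : List Int) (j : Nat) : Int :=
  (presum arr n.toNat - presum arr (j + 1)) - (n - 1 - (j : Int)) * arr.getD j 0

lemma presum_succ (arr : List Int) (j : Nat) (h : j < arr.length) :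
    presum arr (j + 1) = presum arr j + arr.getD j 0 := by
  rw [presum, presum, List.getD_eq_getElem _ _ h]
  exact List.sum_take_succ arr j h

lemma set_map_range (m t : Nat) (f : Nat → Int) (v : Int) (ht : t < m) :
    ((List.range m).map f).set t v = (List.range m).map (fun j => if j = t then v else f j) := by
  apply List.ext_getElem
  · simp
  · intro k h1 h2
    simp only [List.length_map, List.length_range] at h1
    by_cases hk : k = t
    · subst hk
      simp [List.getElem_set]
    · have hk' : ¬ t = k := fun h => hk h.symm
      simp [List.getElem_set, hk, hk']

lemma replicate_eq_map_range (m : Nat) : (List.replicate m (0 : Int)) = (List.range m).map (fun _ => 0) := by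
  simp [List.map_const']

lemma pref_inv (n : Int) (arr : List Int) (hn : 0 < n) (hlen : n.toNat ≤ arr.length) :
    ∀ t : Nat, t ≤ n.toNat →
      (PySem.List.pyRange 1 (t : Int) 1).foldl (pyPref arr) (List.replicate n.toNat 0)
        = (List.range n.toNat).map (fun j => if j < t then cfp arr j else 0) := by
  intro t
  induction t with
  | zero =>
    intro _
    rw [PySem.List.pyRange_one_eq_nil (by norm_num), List.foldl_nil, replicate_eq_map_range]
    apply List.map_congr_left
    intro j _
    simp
  | succ t ih =>
    intro ht
    by_cases h1 : t = 0
    · subst h1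
      rw [show (((0:Nat)+1 : Nat) : Int) = 1 by norm_num]
      rw [PySem.List.pyRange_one_eq_nil (by norm_num), List.foldl_nil, replicate_eq_map_range]
      apply List.map_congr_left
      intro j _
      split_ifs with h
      · have : j = 0 := by omega
        subst this
        simp [cfp, presum]
      · rfl
    · have h2 : 1 ≤ t := by omega
      have hcast : ((t + 1 : Nat) : Int) = (t : Int) + 1 := by push_cast; ring
      rw [hcast, PySem.List.pyRange_one_succ_right (by exact_mod_cast h2), List.foldl_append,
        List.foldl_cons, List.foldl_nil, ih (by omega), pyPref]
      have ecast : (t : Int) - 1 = ((t - 1 : Nat) : Int) := by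
        rw [Nat.cast_sub h2]; norm_num
      rw [ecast]
      simp only [PySem.List.pyGetD_natCast, PySem.List.pySetD_natCast]
      have hrd : (List.map (fun j => if j < t then cfp arr j else 0) (List.range n.toNat)).getD (t - 1) 0
          = cfp arr (t - 1) := by
        rw [List.getD_eq_getElem _ _ (by simp; omega)]
        simp only [List.getElem_map, List.getElem_range]
        rw [if_pos (by omega)]
      rw [hrd, set_map_range _ _ _ _ (by omega)]
      apply List.map_congr_left
      intro j _
      by_cases hj : j = t
      · rw [if_pos hj, if_pos (by omega), hj]
        rw [cfp, cfp]
        have hp := presum_succ arr (t - 1) (by omega)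
        rw [show t - 1 + 1 = t by omega] at hp
        rw [hp, ← ecast]
        ring
      · rw [if_neg hj]
        by_cases hlt : j < t
        · rw [if_pos hlt, if_pos (by omega)]
        · rw [if_neg hlt, if_neg (by omega)]

lemma post_inv (n : Int) (arr : List Int) (hn : 0 < n) (hlen : n.toNat ≤ arr.length) :
    ∀ t : Nat, t ≤ n.toNat →
      (PySem.List.pyRange ((t : Int) - 1) (-1) (-1)).foldl (pyPost n arr)
          ((List.range n.toNat).map (fun (j : Nat) => if (t : Int) ≤ (j : Int) then cfq n arr j else 0))
        = (List.range n.toNat).map (fun j => cfq n arr j) := by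
  have hnm : ((n.toNat : Nat) : Int) = n := Int.toNat_of_nonneg (le_of_lt hn)
  intro t
  induction t with
  | zero =>
    intro _
    rw [show ((0:Nat) : Int) - 1 = -1 by norm_num]
    rw [PySem.List.pyRange_neg_one_eq_nil (by norm_num), List.foldl_nil]
    apply List.map_congr_left
    intro j _
    rw [if_pos (by exact_mod_cast Int.natCast_nonneg j)]
  | succ t ih =>
    intro ht
    have hcast : ((t + 1 : Nat) : Int) - 1 = (t : Int) := by push_cast; ring
    rw [hcast, PySem.List.pyRange_neg_one_cons (by omega), List.foldl_cons, pyPost]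
    have hread : (List.map (fun (j : Nat) => if ((t+1 : Nat) : Int) ≤ (j : Int) then cfq n arr j else 0)
        (List.range n.toNat)).getD (t + 1) 0
        = (if t + 1 < n.toNat then cfq n arr (t + 1) else 0) := by
      by_cases hm : t + 1 < n.toNat
      · rw [if_pos hm, List.getD_eq_getElem _ _ (by simp; omega)]
        simp only [List.getElem_map, List.getElem_range]
        rw [if_pos (by norm_num)]
      · rw [if_neg hm, List.getD_eq_default _ _ (by simp; omega)]
    have ecast : (t : Int) + 1 = ((t + 1 : Nat) : Int) := by push_cast; ring
    rw [ecast]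
    simp only [PySem.List.pyGetD_natCast, PySem.List.pySetD_natCast]
    rw [hread]
    have hv : (arr.getD (t + 1) 0 - arr.getD t 0) * (n - ((t + 1 : Nat) : Int))
        + (if t + 1 < n.toNat then cfq n arr (t + 1) else 0) = cfq n arr t := by
      by_cases hm : t + 1 < n.toNat
      · rw [if_pos hm, cfq, cfq, presum_succ arr (t + 1) (by omega)]
        push_cast
        ring
      · have htm : t + 1 = n.toNat := by omega
        have he : (t : Int) + 1 = n := by rw [← hnm, ← htm]; push_cast; ring
        have h1 : n - 1 - (t : Int) = 0 := by omega
        rw [if_neg hm, cfq, htm, hnm, h1]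
        ring
    rw [hv, set_map_range _ _ _ _ (by omega)]
    rw [← ih (by omega)]
    congr 1
    apply List.map_congr_left
    intro j _
    by_cases hj : j = t
    · rw [if_pos hj, if_pos (by rw [hj]), ← hj]
    · rw [if_neg hj]
      by_cases hle : (t : Int) ≤ (j : Int)
      · rw [if_pos hle, if_pos (by push_cast; push_cast at hle; omega)]
      · rw [if_neg hle, if_neg (by push_cast; push_cast at hle; omega)]

lemma a_closed (n : Int) (arr : List Int) (hn : 0 < n) (hlen : n.toNat ≤ arr.length) :
    discontent2 n arr = (List.range n.toNat).map (fun j => cfp arr j + cfq n arr j) := by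
  have hnm : ((n.toNat : Nat) : Int) = n := Int.toNat_of_nonneg (le_of_lt hn)
  have hm1 : 1 ≤ n.toNat := by omega
  have hq0 : cfq n arr (n.toNat - 1) = 0 := by
    rw [cfq, show n.toNat - 1 + 1 = n.toNat by omega]
    have hc : ((n.toNat - 1 : Nat) : Int) = n - 1 := by rw [Nat.cast_sub hm1, hnm]; norm_num
    rw [hc]
    ring
  have hpref : (PySem.List.pyRange 1 n 1).foldl (pyPref arr) (List.replicate n.toNat 0)
      = (List.range n.toNat).map (cfp arr) := by
    have h := pref_inv n arr hn hlen n.toNat (le_refl _)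
    rw [hnm] at h
    rw [h]
    apply List.map_congr_left
    intro j hj
    simp only [List.mem_range] at hj
    rw [if_pos hj]
  have hpost : (PySem.List.pyRange (n - 2) (-1) (-1)).foldl (pyPost n arr) (List.replicate n.toNat 0)
      = (List.range n.toNat).map (cfq n arr) := by
    have e2 : n - 2 = ((n.toNat - 1 : Nat) : Int) - 1 := by
      rw [Nat.cast_sub hm1, hnm]; ring
    have e3 : (List.replicate n.toNat (0 : Int))
        = (List.range n.toNat).map (fun (j : Nat) =>
            if ((n.toNat - 1 : Nat) : Int) ≤ (j : Int) then cfq n arr j else 0) := by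
      rw [replicate_eq_map_range]
      apply List.map_congr_left
      intro j hj
      simp only [List.mem_range] at hj
      by_cases h : ((n.toNat - 1 : Nat) : Int) ≤ (j : Int)
      · have : j = n.toNat - 1 := by push_cast at h; omega
        rw [if_pos h, this, hq0]
      · rw [if_neg h]
    rw [e2, e3, post_inv n arr hn hlen (n.toNat - 1) (by omega)]
  rw [discontent2]
  rw [hpref, hpost, List.zip_map', List.map_map]
  rfl

lemma b_inv (n S : Int) : ∀ (l : List Int) (s P : Int) (res : List Int),
    ((PySem.List.enumerate l s).foldl (bStep n S) (res, P)).1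
      = res ++ (List.range l.length).map (fun (k : Nat) =>
          (s + (k : Int)) * l.getD k 0 - (P + presum l k)
            + (S - (P + presum l k) - l.getD k 0) - (n - 1 - (s + (k : Int))) * l.getD k 0) := by
  intro l
  induction l with
  | nil => intro s P res; simp [PySem.List.enumerate_nil]
  | cons x xs ih =>
    intro s P res
    rw [PySem.List.enumerate_cons, List.foldl_cons]
    rw [show bStep n S (res, P) (s, x)
        = (res ++ [s * x - P + (S - P - x) - (n - 1 - s) * x], P + x) from rfl]
    rw [ih (s+1) (P+x)]
    rw [List.length_cons, List.range_succ_eq_map, List.map_cons, List.map_map]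
    simp only [List.append_assoc, List.singleton_append]
    congr 1
    congr 1
    · simp [presum]
    · apply List.map_congr_left
      intro k _
      have hps : presum (x :: xs) (k + 1) = x + presum xs k := by simp [presum]
      simp only [Function.comp_apply, List.getD_cons_succ, hps]
      push_cast
      ring

lemma b_closed (n : Int) (arr : List Int) (hn : 0 < n) (hlen : n.toNat ≤ arr.length) :
    discontent2_alt n arr = (List.range n.toNat).map (fun j => cfp arr j + cfq n arr j) := by
  rw [discontent2_alt, if_neg (by omega)]
  simp only [PySem.List.slice_to _ (by omega : (0:Int) ≤ n)]
  rw [b_inv]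
  rw [List.length_take, Nat.min_eq_left hlen]
  rw [List.nil_append]
  apply List.map_congr_left
  intro k hk
  simp only [List.mem_range] at hk
  have hk' : k < arr.length := by omega
  have hgd : (arr.take n.toNat).getD k 0 = arr.getD k 0 := by
    rw [List.getD_eq_getElem _ _ (by rw [List.length_take]; omega),
        List.getD_eq_getElem _ _ hk', List.getElem_take]
  have hps : presum (arr.take n.toNat) k = presum arr k := by
    rw [presum, presum, List.take_take, Nat.min_eq_left (by omega)]
  have hS : (arr.take n.toNat).sum = presum arr n.toNat := rfl
  rw [hgd, hps, hS, cfp, cfq, presum_succ arr k hk']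
  ring

-- ===== VERDICT (by name: the statement is the Claim_ definition above) =====
theorem discontent2_spec : Claim_equal_discontent2 := by
  intro n arr _ hpre
  unfold Spec_discontent2
  by_cases hn : n ≤ 0
  · have h1 : discontent2 n arr = [] := by
      simp [discontent2, PySem.List.pyRange_one_eq_nil (by omega : n ≤ 1),
        PySem.List.pyRange_neg_one_eq_nil (by omega : n - 2 ≤ -1),
        Int.toNat_of_nonpos hn]
    have h2 : discontent2_alt n arr = [] := by simp [discontent2_alt, hn]
    rw [h1, h2]
  · push_neg at hn
    have hlen : n.toNat ≤ arr.length := by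
      unfold Pre_discontent2 at hpre; omega
    rw [a_closed n arr hn hlen, b_closed n arr hn hlen]
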